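-- pv_equiv track=rewrite | github.com/JisinKeo/Algorithm | Programmers/Level2/기능개발.py | solution
-- ===== SOURCE A (Python) =====
-- def solution(progresses, speeds):
--     answer = []
--
--     day = []
--     length = len(progresses)
--
--     for i in range(length):
--         cnt = 0
--         while True:
--             if progresses[i] >= 100:
--                 day.append(cnt)
--                 break
--             progresses[i] += speeds[i]
--             cnt += 1
--     count = 0
--     k = 0
--     for i in range(0, len(day)-1):
--         if day[k]>=day[i+1]:
--             count += 1
--         elif day[k] < day[i+1]:
--             answer.append(count+1)
--             k = i+1
--             count = 0
--
--     answer.append(count+1)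
--     return answer
-- ===== SOURCE B (Python) =====
-- def solution(progresses, speeds):
--     # ceil-division instead of day-by-day simulation; single value-based grouping pass
--     days = [0 if p >= 100 else -((p - 100) // s) for p, s in zip(progresses, speeds)]
--     answer = []
--     count = 0                      # features riding along with the current batch leader
--     lead = days[0] if days else 0  # deploy day of the current batch's first feature
--     for d in days[1:]:
--         if d <= lead:
--             count += 1
--         else:
--             answer.append(count + 1)
--             lead = d
--             count = 0
--     answer.append(count + 1)
--     return answer
-- ===== Notes on version B (the rewrite author's own statement) =====
-- stated objective: alternative
-- what changed: B replaces A's day-by-day simulation of each feature (inner while-loop) with a ceiling-division formula and fuses the two passes (day list + index-based grouping) into one value-based grouping pass over zip(progresses, speeds); intended as faster (O(n) vs O(n*maxDays)) but a timing run could not confirm a clean reading, so no speed is claimed.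
-- outside the precondition, e.g. on solution([100, 100], [1]): A returns [2], B returns [1]
import Mathlib
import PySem

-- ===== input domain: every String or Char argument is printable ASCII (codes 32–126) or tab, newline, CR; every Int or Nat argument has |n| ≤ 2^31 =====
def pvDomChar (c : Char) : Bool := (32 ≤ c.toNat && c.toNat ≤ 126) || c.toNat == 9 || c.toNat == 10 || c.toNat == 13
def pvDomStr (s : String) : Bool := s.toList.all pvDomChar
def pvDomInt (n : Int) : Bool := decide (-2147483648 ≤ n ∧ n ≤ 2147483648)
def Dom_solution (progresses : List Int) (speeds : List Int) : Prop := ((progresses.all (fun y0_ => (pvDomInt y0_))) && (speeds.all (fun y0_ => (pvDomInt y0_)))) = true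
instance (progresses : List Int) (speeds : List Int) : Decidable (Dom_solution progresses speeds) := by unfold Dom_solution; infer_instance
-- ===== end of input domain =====

-- B computes each feature's remaining days by ceiling division instead of A's day-by-day
-- simulation, and groups by value in one pass (objective: alternative).
-- Python A mutates `progresses` in place while simulating; the equivalence proved here is
-- about the RETURN value only (B does not mutate its arguments).

-- ===== PORT A =====
-- the inner `while True` loop of A; the Nat fuel is only a totality guard — under
-- Pre_solution the fuel (100 - p).toNat + 1 is never exhausted
def aCount : Nat → Int → Int → Int → Int
  | 0, _, _, cnt => cnt
  | f + 1, p, s, cnt => if p ≥ 100 then cnt else aCount f (p + s) s (cnt + 1)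

-- body of A's second loop (state = (answer, count, k))
def aStep (day : List Int) (st : List Int × Int × Nat) (i : Nat) : List Int × Int × Nat :=
  let dk := PySem.List.pyGetD day (st.2.2 : Int) 0
  let di := PySem.List.pyGetD day ((i : Int) + 1) 0
  if dk ≥ di then (st.1, st.2.1 + 1, st.2.2)
  else (st.1 ++ [st.2.1 + 1], 0, i + 1)

def solution (progresses : List Int) (speeds : List Int) : List Int :=
  let day := (List.range progresses.length).foldl
    (fun (day : List Int) (i : Nat) =>
      let p := PySem.List.pyGetD progresses (i : Int) 0
      let s := PySem.List.pyGetD speeds (i : Int) 0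
      day ++ [aCount ((100 - p).toNat + 1) p s 0]) []
  let st := (List.range (day.length - 1)).foldl (aStep day) ([], 0, 0)
  st.1 ++ [st.2.1 + 1]

-- ===== PORT B =====
-- d = 0 if p >= 100 else -((p - 100) // s)
def bDay (p : Int) (s : Int) : Int :=
  if p ≥ 100 then 0 else -(PySem.Int.floordiv (p - 100) s)

-- body of B's grouping loop (state = (answer, lead, count))
def bStep (st : List Int × Int × Int) (d : Int) : List Int × Int × Int :=
  if d ≤ st.2.1 then (st.1, st.2.1, st.2.2 + 1)
  else (st.1 ++ [st.2.2 + 1], d, 0)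

def solution_alt (progresses : List Int) (speeds : List Int) : List Int :=
  let days := (progresses.zip speeds).map (fun ps => bDay ps.1 ps.2)
  let lead : Int := days.getD 0 0   -- days[0] if days else 0
  let st := (days.drop 1).foldl bStep ([], lead, 0)
  st.1 ++ [st.2.2 + 1]

-- ===== PRECONDITION & SPEC =====
-- Pre_ excludes (a) pairs with speed ≤ 0 on an unfinished feature, where A's while-loop never
-- terminates, and (b) inputs where progresses is longer than speeds: there A raises IndexError
-- except in the contrived case where every excess feature is already ≥ 100 (which A accepts
-- but B's zip truncates; see cite).
def Pre_solution (progresses : List Int) (speeds : List Int) : Prop :=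
  progresses.length ≤ speeds.length ∧
  ∀ ps ∈ progresses.zip speeds, 100 ≤ ps.1 ∨ 1 ≤ ps.2
instance (progresses : List Int) (speeds : List Int) : Decidable (Pre_solution progresses speeds) := by
  unfold Pre_solution; infer_instance

def pvWitness_solution : List Int × List Int := ([93, 30, 55], [1, 30, 5])

def Spec_solution (progresses : List Int) (speeds : List Int) (out : List Int) : Prop :=
  out = solution_alt progresses speeds
instance (progresses : List Int) (speeds : List Int) (out : List Int) : Decidable (Spec_solution progresses speeds out) := by
  unfold Spec_solution; infer_instance

-- ===== CLAIM (what is proved, stated in full; the proofs are below) =====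
def Claim_equal_solution : Prop := ∀ (progresses : List Int) (speeds : List Int), Dom_solution progresses speeds → Pre_solution progresses speeds → Spec_solution progresses speeds (solution progresses speeds)

-- ===== LEMMAS AND PROOFS =====

-- common specification of the grouping pass
def grp : Int → Int → List Int → List Int
  | _, size, [] => [size]
  | lead, size, d :: rest =>
    if lead ≥ d then grp lead (size + 1) rest else size :: grp d 1 rest

theorem bDay_step (p s : Int) (hp : p < 100) (hs : 1 ≤ s) :
    bDay p s = 1 + bDay (p + s) s := by
  have hs0 : 0 < s := by omega
  have hrw : p - 100 = -(100 - p) := by ring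
  unfold bDay
  rw [if_neg (show ¬ p ≥ 100 by omega)]
  by_cases h : p + s ≥ 100
  · rw [if_pos h, hrw, PySem.Int.neg_floordiv_neg_eq_iff_of_pos hs0]
    constructor <;> nlinarith
  · have hq : -(PySem.Int.floordiv (-(100 - (p + s))) s) = -(PySem.Int.floordiv (p + s - 100) s) := by
      rw [show -(100 - (p + s)) = p + s - 100 by ring]
    have hb := (PySem.Int.neg_floordiv_neg_eq_iff_of_pos hs0).mp hq
    rw [if_neg h, hrw, PySem.Int.neg_floordiv_neg_eq_iff_of_pos hs0]
    constructor <;> nlinarith [hb.1, hb.2]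

theorem aCount_eq (f : Nat) : ∀ (p cnt s : Int), 1 ≤ s → (100 - p).toNat < f →
    aCount f p s cnt = cnt + bDay p s := by
  induction f with
  | zero => intro p cnt s _ h; omega
  | succ f ih =>
    intro p cnt s hs h
    by_cases hp : p ≥ 100
    · simp [aCount, bDay, hp]
    · have hp' : p < 100 := by omega
      have : aCount (f + 1) p s cnt = aCount f (p + s) s (cnt + 1) := by
        simp [aCount, hp]
      rw [this, ih (p + s) (cnt + 1) s hs (by omega), bDay_step p s hp' hs]
      ring

theorem aCount_val (p s : Int) (h : 100 ≤ p ∨ 1 ≤ s) :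
    aCount ((100 - p).toNat + 1) p s 0 = bDay p s := by
  rcases h with h | h
  · simp [aCount, bDay, h]
  · rw [aCount_eq _ p 0 s h (by omega)]; ring

theorem foldl_app_singleton {α β : Type} (f : α → β) (xs : List α) (acc : List β) :
    xs.foldl (fun a x => a ++ [f x]) acc = acc ++ xs.map f := by
  induction xs generalizing acc with
  | nil => simp
  | cons x xs ih => simp [List.foldl_cons, ih, List.append_assoc]

theorem aDays_eq (progresses speeds : List Int) (h : Pre_solution progresses speeds) :
    (List.range progresses.length).foldl
      (fun (day : List Int) (i : Nat) =>
        let p := PySem.List.pyGetD progresses (i : Int) 0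
        let s := PySem.List.pyGetD speeds (i : Int) 0
        day ++ [aCount ((100 - p).toNat + 1) p s 0]) []
    = (progresses.zip speeds).map (fun ps => bDay ps.1 ps.2) := by
  obtain ⟨hlen, hps⟩ := h
  rw [foldl_app_singleton]
  simp only [List.nil_append]
  apply List.ext_getElem
  · simp; omega
  · intro i h1 h2
    have hip : i < progresses.length := by simpa using h1
    have his : i < speeds.length := by omega
    have hiz : i < (progresses.zip speeds).length := by simp; omega
    have hz : (progresses.zip speeds)[i] = (progresses[i], speeds[i]) := by
      simp
    have hmem : (progresses[i], speeds[i]) ∈ progresses.zip speeds := by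
      rw [← hz]; exact List.getElem_mem hiz
    have hcond := hps _ hmem
    have e1 : PySem.List.pyGetD progresses ((i : Nat) : Int) 0 = progresses[i] := by
      rw [PySem.List.pyGetD_natCast, List.getD_eq_getElem?_getD,
        List.getElem?_eq_getElem hip]; rfl
    have e2 : PySem.List.pyGetD speeds ((i : Nat) : Int) 0 = speeds[i] := by
      rw [PySem.List.pyGetD_natCast, List.getD_eq_getElem?_getD,
        List.getElem?_eq_getElem his]; rfl
    rw [List.getElem_map, List.getElem_map, List.getElem_range, hz, e1, e2]
    exact aCount_val _ _ hcond

theorem aGrp (day : List Int) : ∀ (m j : Nat) (answer : List Int) (count : Int) (k : Nat),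
    j + m + 1 = day.length → k < day.length →
    (let st := (List.range' j m).foldl (aStep day) (answer, count, k)
     st.1 ++ [st.2.1 + 1]) = answer ++ grp (day.getD k 0) (count + 1) (day.drop (j + 1)) := by
  intro m
  induction m with
  | zero =>
    intro j answer count k hj hk
    have : day.drop (j + 1) = [] := by
      apply List.drop_eq_nil_of_le; omega
    simp [this, grp]
  | succ m ih =>
    intro j answer count k hj hk
    have hj1 : j + 1 < day.length := by omega
    have hdrop : day.drop (j + 1) = day[j + 1] :: day.drop (j + 1 + 1) := by
      rw [List.drop_eq_getElem_cons hj1]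
    have hstep : aStep day (answer, count, k) j =
        if day.getD k 0 ≥ day[j + 1] then (answer, count + 1, k)
        else (answer ++ [count + 1], 0, j + 1) := by
      simp only [aStep]
      have h1 : PySem.List.pyGetD day ((k : Nat) : Int) 0 = day.getD k 0 := by
        rw [PySem.List.pyGetD_natCast]
      have h2 : PySem.List.pyGetD day ((j : Int) + 1) 0 = day[j + 1] := by
        have hc : ((j : Int) + 1) = (((j + 1 : Nat)) : Int) := by push_cast; ring
        rw [hc, PySem.List.pyGetD_natCast, List.getD_eq_getElem?_getD,
          List.getElem?_eq_getElem hj1]; rfl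
      rw [h1, h2]
    simp only [List.range'_succ, List.foldl_cons]
    rw [hstep, hdrop]
    by_cases hc : day.getD k 0 ≥ day[j + 1]
    · rw [if_pos hc]
      have hrec := ih (j + 1) answer (count + 1) k (by omega) hk
      simp only at hrec
      rw [hrec]
      have hgrp : grp (day.getD k 0) (count + 1) (day[j + 1] :: day.drop (j + 1 + 1))
          = grp (day.getD k 0) (count + 1 + 1) (day.drop (j + 1 + 1)) := by
        simp only [grp]; rw [if_pos hc]
      rw [hgrp]
    · rw [if_neg hc]
      have hrec := ih (j + 1) (answer ++ [count + 1]) 0 (j + 1) (by omega) hj1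
      simp only at hrec
      rw [hrec]
      have hk1 : day.getD (j + 1) 0 = day[j + 1] := by
        rw [List.getD_eq_getElem?_getD, List.getElem?_eq_getElem hj1]; rfl
      have hgrp : grp (day.getD k 0) (count + 1) (day[j + 1] :: day.drop (j + 1 + 1))
          = (count + 1) :: grp day[j + 1] 1 (day.drop (j + 1 + 1)) := by
        simp only [grp]; rw [if_neg hc]
      rw [hgrp, hk1, List.append_assoc]
      simp

theorem bGrp : ∀ (ds : List Int) (answer : List Int) (lead count : Int),
    (let st := ds.foldl bStep (answer, lead, count)
     st.1 ++ [st.2.2 + 1]) = answer ++ grp lead (count + 1) ds := by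
  intro ds
  induction ds with
  | nil => intro answer lead count; simp [grp]
  | cons d rest ih =>
    intro answer lead count
    simp only [List.foldl_cons]
    by_cases hc : lead ≥ d
    · have hb : bStep (answer, lead, count) d = (answer, lead, count + 1) := by
        simp [bStep, hc]
      rw [hb]
      have hrec := ih answer lead (count + 1)
      simp only at hrec
      rw [hrec]
      have hgrp : grp lead (count + 1) (d :: rest) = grp lead (count + 1 + 1) rest := by
        simp only [grp]; rw [if_pos hc]
      rw [hgrp]
    · have hb : bStep (answer, lead, count) d = (answer ++ [count + 1], d, 0) := by
        simp [bStep]; omega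
      rw [hb]
      have hrec := ih (answer ++ [count + 1]) d 0
      simp only at hrec
      rw [hrec]
      have hgrp : grp lead (count + 1) (d :: rest) = (count + 1) :: grp d 1 rest := by
        simp only [grp]; rw [if_neg hc]
      rw [hgrp, List.append_assoc]
      simp

-- ===== VERDICT (by name: the statement is the Claim_ definition above) =====
theorem solution_spec : Claim_equal_solution := by
  intro progresses speeds _ hpre
  unfold Spec_solution
  set days := (progresses.zip speeds).map (fun ps => bDay ps.1 ps.2) with hdays
  have hsol : solution progresses speeds =
      (let st := (List.range (days.length - 1)).foldl (aStep days) ([], 0, 0)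
       st.1 ++ [st.2.1 + 1]) := by
    simp only [solution]
    rw [aDays_eq progresses speeds hpre]
  have halt : solution_alt progresses speeds =
      (let st := (days.drop 1).foldl bStep ([], days.getD 0 0, 0)
       st.1 ++ [st.2.2 + 1]) := rfl
  have hB := bGrp (days.drop 1) [] (days.getD 0 0) 0
  simp only at hB
  rw [hsol, halt]
  simp only
  rw [hB, List.nil_append]
  cases hd : days with
  | nil => simp [grp]
  | cons d0 rest =>
    have hl1 : 0 + rest.length + 1 = days.length := by rw [hd]; simp
    have hl0 : 0 < days.length := by rw [hd]; simp
    have hmain := aGrp days rest.length 0 [] 0 0 hl1 hl0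
    simp only at hmain
    have hr : (d0 :: rest).length - 1 = rest.length := by simp
    rw [hd] at hmain
    rw [hr, List.range_eq_range', hmain]
    simp
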